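-- pv_equiv track=rewrite | github.com/MiniSpaceHamster/ATBS | pigLatin.py | convertMessage
-- ===== SOURCE A (Python) =====
-- def convertMessage(message):
--     '''
--     convertMessage(message) - Receives a string and returns a string converted
--     to pig latin using pigLatin(word). The case and puntuation of the original
--     message are preserved.
--     '''
--     messageSplit = []
--     newMessage = ''
--     word = ''
--
--     # Split the message into words keeping the puctuation in place.
--     for char in message:
--         # Construct word from sequential alphanumaric characters.
--         if char.isalnum():
--             word += str(char)
--         # Spaces or punctuation adds word to messageSplit and resets word.
--         else:
--             if len(word) > 0:
--                 messageSplit.append(word)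
--                 word = ''
--             messageSplit.append(str(char))
--     # Catch single word messages without punctuation.
--     if len(word) > 0:
--         messageSplit.append(word)
--     # Test to ensure only words are passed to pigLatin() coverter.
--     for item in messageSplit:
--         if item.isalpha():
--             newMessage += pigLatin(item)
--         else:
--             newMessage += item
--     return newMessage
--
-- def pigLatin(word):
--     '''
--     pigLatin(word) - Receives a string returns a word converted to pig latin.
--     If the word begins with a vowel, 'yay' is added to the end of the word;
--     otherwise, consonants are moved to the end of the word and 'ay' is added
--     to the end. The original case of the word is preserved; however, single
--     vowel words are not treated as all caps e.g. 'I' will be 'Iyay'.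
--     '''
--     word = word
--     # Check the case of the word prior to manipulating the string.
--     allCaps = word.isupper()
--     titleCase = word.istitle()
--
--     VOWELS = 'aeiouAEIOU'
--     VOWELSY = VOWELS + 'yY'
--
--     # If the word starts with a vowel, add 'yay' or 'YAY' depending on case.
--     if word[0] in VOWELS:
--         if allCaps and len(word) > 1:
--             word += 'YAY'
--             return word
--         else:
--             word += 'yay'
--             return word
--     # Move consonants to the end of the word and stop at the first vowel or y.
--     for char in word:
--         if word[0] not in VOWELSY:
--             if allCaps:
--                 word += word[0]
--             else:
--                 word += word[0].lower()
--             word = word[1:]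
--         else:
--             break
--     # If the word starts with a consonant, add 'ay' or 'AY' depending on case.
--     if allCaps:
--         word += 'AY'
--     elif titleCase:
--         word += 'ay'
--         word = word.title()
--     else:
--         word += 'ay'
--     return word
-- ===== SOURCE B (Python) =====
-- def convertMessage(message):
--     '''One-pass tokenization into maximal alnum/non-alnum runs; alpha runs are
--     pig-latinized (slice arithmetic instead of char-by-char rotation).'''
--     out = []
--     i = 0
--     n = len(message)
--     while i < n:
--         j = i + 1
--         while j < n and message[j].isalnum() == message[i].isalnum():
--             j += 1
--         tok = message[i:j]
--         out.append(pigLatin(tok) if tok.isalpha() else tok)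
--         i = j
--     return ''.join(out)
--
-- def pigLatin(word):
--     VOWELS = 'aeiouAEIOU'
--     allCaps = word.isupper()
--     if word[0] in VOWELS:
--         return word + ('YAY' if allCaps and len(word) > 1 else 'yay')
--     k = 0
--     while k < len(word) and word[k] not in VOWELS + 'yY':
--         k += 1
--     moved = word[k:] + (word[:k] if allCaps else word[:k].lower())
--     res = moved + ('AY' if allCaps else 'ay')
--     if not allCaps and word.istitle():
--         res = res.capitalize()
--     return res
-- ===== Notes on version B (the rewrite author's own statement) =====
-- stated objective: alternative
-- what changed: Tokenization is a single index-based scan over maximal runs of equal isalnum() (instead of A's char-accumulator split into words plus one-char punctuation tokens), and pigLatin computes the first vowel-or-y index and rebuilds the word with slices plus capitalize() (instead of A's one-char-at-a-time rotation loop and title()).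
import Mathlib
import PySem

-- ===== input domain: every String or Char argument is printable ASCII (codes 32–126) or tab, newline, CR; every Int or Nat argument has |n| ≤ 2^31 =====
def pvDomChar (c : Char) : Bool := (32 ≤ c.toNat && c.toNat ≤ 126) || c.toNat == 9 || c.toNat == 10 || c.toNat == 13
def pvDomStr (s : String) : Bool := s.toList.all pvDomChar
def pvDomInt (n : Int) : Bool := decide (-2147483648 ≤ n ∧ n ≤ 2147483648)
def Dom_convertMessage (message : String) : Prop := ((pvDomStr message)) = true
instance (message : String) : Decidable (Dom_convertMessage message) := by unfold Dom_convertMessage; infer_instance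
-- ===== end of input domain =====

-- B re-implements convertMessage with one-pass maximal-run tokenization (alnum/non-alnum runs)
-- and a slice-arithmetic pigLatin (split index + rotation) instead of A's char-by-char
-- accumulator split and one-char-at-a-time rotation loop; objective: simpler, same cost.


-- ===== PORT A =====
-- shared constants of both Pythons
def pvVowels : List Char := ['a','e','i','o','u','A','E','I','O','U']
def pvVowelsY : List Char := pvVowels ++ ['y','Y']

-- str.isupper(), hand-ported (exact on the ASCII domain): some cased char and no lowercase one
def pyIsupper (cs : List Char) : Bool :=
  cs.any PySem.Chars.isupper && !(cs.any PySem.Chars.islower)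

-- str.istitle(), hand-ported (exact on the ASCII domain): state = (previous char cased, cased char seen)
def istitleAux : List Char → Bool → Bool → Bool
  | [], _, seen => seen
  | c :: r, prev, seen =>
    if PySem.Chars.isupper c then (if prev then false else istitleAux r true true)
    else if PySem.Chars.islower c then (if prev then istitleAux r true true else false)
    else istitleAux r false seen

def pyIstitle (cs : List Char) : Bool := istitleAux cs false false

-- str.title(), hand-ported (exact on the ASCII domain): upper after non-cased, lower otherwise
def titleAux : List Char → Bool → List Char
  | [], _ => []
  | c :: r, prev =>
    if PySem.Chars.isalpha c then
      (if prev then PySem.Chars.lowerChar c else PySem.Chars.upperChar c) :: titleAux r true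
    else c :: titleAux r false

def pyTitle (cs : List Char) : List Char := titleAux cs false

-- A's consonant-moving loop: 'for char in word' runs len(original word) times (the fuel);
-- each step moves word[0] (lowered unless allCaps) to the end unless word[0] is a vowel or y
def moveLoopA : Nat → List Char → Bool → List Char
  | 0, w, _ => w
  | _ + 1, [], _ => []  -- unreachable: the list length is preserved by every step
  | n + 1, c :: rest, allCaps =>
    if !(pvVowelsY.contains c) then
      moveLoopA n (rest ++ [if allCaps then c else PySem.Chars.lowerChar c]) allCaps
    else c :: rest

def pigLatinA (word : List Char) : List Char :=
  let allCaps := pyIsupper word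
  let titleCase := pyIstitle word
  match word with
  | [] => []  -- Python raises IndexError on ''; unreachable: callers pass isalpha tokens only
  | c0 :: _ =>
    if pvVowels.contains c0 then
      if allCaps && decide (word.length > 1) then word ++ ['Y','A','Y']
      else word ++ ['y','a','y']
    else
      let w := moveLoopA word.length word allCaps
      if allCaps then w ++ ['A','Y']
      else if titleCase then pyTitle (w ++ ['a','y'])
      else w ++ ['a','y']

-- the first loop of A: state (messageSplit, word)
def splitStepA (st : List (List Char) × List Char) (c : Char) : List (List Char) × List Char :=
  if PySem.Chars.isalnum c then (st.1, st.2 ++ [c])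
  else if st.2.length > 0 then (st.1 ++ [st.2] ++ [[c]], [])
  else (st.1 ++ [[c]], [])

-- the second loop of A
def emitStepA (acc : List Char) (item : List Char) : List Char :=
  acc ++ (if PySem.Chars.strIsalpha item then pigLatinA item else item)

def convertMessage (message : String) : String :=
  let st := message.toList.foldl splitStepA ([], [])
  let messageSplit := if st.2.length > 0 then st.1 ++ [st.2] else st.1
  String.ofList (messageSplit.foldl emitStepA [])

-- ===== PORT B =====
-- str.capitalize(), hand-ported (exact on the ASCII domain)
def pyCapitalize : List Char → List Char
  | [] => []
  | c :: r => PySem.Chars.upperChar c :: r.map PySem.Chars.lowerChar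

-- B's k loop: length of the leading run of non-vowel-or-y characters
def countConsB : List Char → Nat
  | [] => 0
  | c :: r => if pvVowelsY.contains c then 0 else countConsB r + 1

def pigLatinB (word : List Char) : List Char :=
  let allCaps := pyIsupper word
  match word with
  | [] => []  -- Python raises IndexError on ''; unreachable: callers pass isalpha tokens only
  | c0 :: _ =>
    if pvVowels.contains c0 then
      word ++ (if allCaps && decide (word.length > 1) then ['Y','A','Y'] else ['y','a','y'])
    else
      let k := countConsB word
      -- word[k:] + (word[:k] or word[:k].lower()); .lower() is charwise lowerChar
      let moved := word.drop k ++ (if allCaps then word.take k else (word.take k).map PySem.Chars.lowerChar)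
      let res := moved ++ (if allCaps then ['A','Y'] else ['a','y'])
      if !allCaps && pyIstitle word then pyCapitalize res else res

-- B's outer while loop: maximal runs of characters with equal isalnum()
def runsB : List Char → List (List Char)
  | [] => []
  | c :: rest =>
    (c :: rest.takeWhile (fun d => PySem.Chars.isalnum d == PySem.Chars.isalnum c)) ::
      runsB (rest.dropWhile (fun d => PySem.Chars.isalnum d == PySem.Chars.isalnum c))
  termination_by cs => cs.length
  decreasing_by
    simp only [List.length_cons]
    exact Nat.lt_succ_of_le (List.length_dropWhile_le _ rest)

def convertMessage_alt (message : String) : String :=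
  String.ofList (((runsB message.toList).map
    (fun tok => if PySem.Chars.strIsalpha tok then pigLatinB tok else tok)).flatten)

-- ===== PRECONDITION & SPEC =====
def Spec_convertMessage (message : String) (out : String) : Prop := out = convertMessage_alt message
instance (message : String) (out : String) : Decidable (Spec_convertMessage message out) := by unfold Spec_convertMessage; infer_instance

-- ===== CLAIM (what is proved, stated in full; the proofs are below) =====
def Claim_equal_convertMessage : Prop := ∀ (message : String), Dom_convertMessage message → Spec_convertMessage message (convertMessage message)

-- ===== LEMMAS AND PROOFS =====
-- the char moved to the end by A's loop
def pvMove (allCaps : Bool) (c : Char) : Char := if allCaps then c else PySem.Chars.lowerChar c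

-- A's word splitter as a direct recursion (w = the word accumulated so far)
def tokA (w : List Char) : List Char → List (List Char)
  | [] => if w.length > 0 then [w] else []
  | c :: cs =>
    if PySem.Chars.isalnum c then tokA (w ++ [c]) cs
    else ((if w.length > 0 then [w] else []) ++ [[c]]) ++ tokA [] cs

def emitB (tok : List Char) : List Char :=
  if PySem.Chars.strIsalpha tok then pigLatinB tok else tok

def renderB (ts : List (List Char)) : List Char := (ts.map emitB).flatten

theorem isalpha_isalnum {c : Char} (h : PySem.Chars.isalpha c = true) :
    PySem.Chars.isalnum c = true := by
  simp [PySem.Chars.isalnum, h]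

theorem isalnum_not_isalpha {c : Char} (h : PySem.Chars.isalnum c = false) :
    PySem.Chars.isalpha c = false := by
  cases ha : PySem.Chars.isalpha c
  · rfl
  · exact absurd h (by simp [isalpha_isalnum ha])

theorem isalpha_lowerChar {c : Char} (h : PySem.Chars.isalpha c = true) :
    PySem.Chars.isalpha (PySem.Chars.lowerChar c) = true := by
  unfold PySem.Chars.lowerChar
  split
  · rename_i hu
    unfold PySem.Chars.isupper at hu
    simp only [Bool.and_eq_true, decide_eq_true_eq] at hu
    obtain ⟨h1, h2⟩ := hu
    rw [Char.le_def] at h1 h2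
    have h1' : 65 ≤ c.toNat := h1
    have h2' : c.toNat ≤ 90 := h2
    have hv : (c.toNat + 32).isValidChar := Or.inl (by omega)
    have ht : (Char.ofNat (c.toNat + 32)).toNat = c.toNat + 32 := by
      rw [Char.toNat_ofNat, if_pos hv]
    unfold PySem.Chars.isalpha PySem.Chars.islower
    simp only [Bool.or_eq_true, Bool.and_eq_true, decide_eq_true_eq]
    right
    constructor
    · rw [Char.le_def]
      show ('a' : Char).toNat ≤ (Char.ofNat (c.toNat + 32)).toNat
      rw [ht]
      have ha' : ('a' : Char).toNat = 97 := rfl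
      omega
    · rw [Char.le_def]
      show (Char.ofNat (c.toNat + 32)).toNat ≤ ('z' : Char).toNat
      rw [ht]
      have hz' : ('z' : Char).toNat = 122 := rfl
      omega
  · exact h

theorem dropWhile_head_false {α : Type} (pr : α → Bool) :
    ∀ (l : List α) (d : α) (s : List α), l.dropWhile pr = d :: s → pr d = false := by
  intro l
  induction l with
  | nil => intro d s h; simp at h
  | cons a l ih =>
    intro d s h
    by_cases ha : pr a = true
    · rw [List.dropWhile_cons_of_pos ha] at h; exact ih d s h
    · rw [List.dropWhile_cons_of_neg ha] at h
      cases h; simpa using ha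

-- moveLoopA when a vowel-or-y is reached: rotate the non-vowel prefix past it
theorem moveLoopA_reach (allCaps : Bool) :
    ∀ (p : List Char) (c : Char) (s : List Char) (n : Nat), p.length ≤ n →
      (∀ x ∈ p, pvVowelsY.contains x = false) → pvVowelsY.contains c = true →
      moveLoopA n (p ++ c :: s) allCaps = c :: s ++ p.map (pvMove allCaps) := by
  intro p
  induction p with
  | nil =>
    intro c s n _ _ hc
    cases n with
    | zero => simp [moveLoopA]
    | succ m =>
      show moveLoopA (m + 1) (c :: s) allCaps = _
      rw [moveLoopA, hc]
      simp
  | cons a p ih =>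
    intro c s n hn hp hc
    cases n with
    | zero => simp at hn
    | succ m =>
      have ha : pvVowelsY.contains a = false := hp a (by simp)
      have step : moveLoopA (m + 1) ((a :: p) ++ c :: s) allCaps
          = moveLoopA m (p ++ c :: (s ++ [pvMove allCaps a])) allCaps := by
        show moveLoopA (m + 1) (a :: (p ++ c :: s)) allCaps = _
        rw [moveLoopA, ha]
        simp [pvMove]
      rw [step, ih c (s ++ [pvMove allCaps a]) m (by simpa using hn)
        (fun x hx => hp x (by simp [hx])) hc]
      simp

-- moveLoopA on an all-consonant word: full rotation (only heads from p are ever tested)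
theorem moveLoopA_all (allCaps : Bool) :
    ∀ (p q : List Char), (∀ x ∈ p, pvVowelsY.contains x = false) →
      moveLoopA p.length (p ++ q.map (pvMove allCaps)) allCaps
        = (q ++ p).map (pvMove allCaps) := by
  intro p
  induction p with
  | nil => intro q _; simp [moveLoopA]
  | cons a p ih =>
    intro q hp
    have ha : pvVowelsY.contains a = false := hp a (by simp)
    show moveLoopA (p.length + 1) (a :: (p ++ q.map (pvMove allCaps))) allCaps = _
    rw [moveLoopA, ha]
    simp only [Bool.not_false, if_pos rfl]
    have : p ++ q.map (pvMove allCaps) ++ [if allCaps then a else PySem.Chars.lowerChar a]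
        = p ++ (q ++ [a]).map (pvMove allCaps) := by simp [pvMove]
    rw [this, ih (q ++ [a]) (fun x hx => hp x (by simp [hx]))]
    simp

theorem countConsB_take_drop :
    ∀ w : List Char,
      w.take (countConsB w) = w.takeWhile (fun c => !(pvVowelsY.contains c)) ∧
      w.drop (countConsB w) = w.dropWhile (fun c => !(pvVowelsY.contains c)) := by
  intro w
  induction w with
  | nil => simp [countConsB]
  | cons c r ih =>
    by_cases h : pvVowelsY.contains c = true
    · have h' : c ∈ pvVowelsY := by simpa using h
      simp [countConsB, h, h', List.takeWhile_cons, List.dropWhile_cons]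
    · have h' : c ∉ pvVowelsY := by simpa using h
      simp only [Bool.not_eq_true] at h
      simp [countConsB, h, h', List.takeWhile_cons, List.dropWhile_cons, ih.1, ih.2]

theorem titleAux_alpha_true :
    ∀ l : List Char, (∀ c ∈ l, PySem.Chars.isalpha c = true) →
      titleAux l true = l.map PySem.Chars.lowerChar := by
  intro l
  induction l with
  | nil => simp [titleAux]
  | cons c r ih =>
    intro h
    simp [titleAux, h c (by simp), ih (fun x hx => h x (by simp [hx]))]

theorem pyTitle_eq_capitalize (l : List Char) (h : ∀ c ∈ l, PySem.Chars.isalpha c = true) :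
    pyTitle l = pyCapitalize l := by
  cases l with
  | nil => rfl
  | cons c r =>
    simp [pyTitle, titleAux, pyCapitalize, h c (by simp),
      titleAux_alpha_true r (fun x hx => h x (by simp [hx]))]

theorem moveLoopA_spec (w : List Char) (cap : Bool) :
    moveLoopA w.length w cap
      = w.dropWhile (fun c => !(pvVowelsY.contains c))
        ++ (w.takeWhile (fun c => !(pvVowelsY.contains c))).map (pvMove cap) := by
  have hps := List.takeWhile_append_dropWhile
    (p := fun c => !(pvVowelsY.contains c)) (l := w)
  have hpmem : ∀ x ∈ w.takeWhile (fun c => !(pvVowelsY.contains c)),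
      pvVowelsY.contains x = false := by
    intro x hx; simpa using List.mem_takeWhile_imp hx
  cases hscase : w.dropWhile (fun c => !(pvVowelsY.contains c)) with
  | nil =>
    rw [hscase, List.append_nil] at hps
    have h1 := moveLoopA_all cap (w.takeWhile (fun c => !(pvVowelsY.contains c))) [] hpmem
    simp only [List.map_nil, List.append_nil, List.nil_append] at h1
    calc moveLoopA w.length w cap
        = moveLoopA (w.takeWhile (fun c => !(pvVowelsY.contains c))).length
            (w.takeWhile (fun c => !(pvVowelsY.contains c)) ++ ([] : List Char).map (pvMove cap)) cap := by
          rw [List.map_nil, List.append_nil, hps]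
      _ = _ := by rw [moveLoopA_all cap _ [] hpmem]; simp
  | cons d s' =>
    have hd : pvVowelsY.contains d = true := by
      simpa using dropWhile_head_false (fun c => !(pvVowelsY.contains c)) w d s' hscase
    have hlen : (w.takeWhile (fun c => !(pvVowelsY.contains c))).length ≤ w.length :=
      (List.takeWhile_sublist _).length_le
    have h := moveLoopA_reach cap (w.takeWhile (fun c => !(pvVowelsY.contains c))) d s'
      w.length hlen hpmem hd
    rw [hscase] at hps
    conv_lhs => rw [← hps]
    rw [show (w.takeWhile (fun c => !(pvVowelsY.contains c)) ++ d :: s').length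
      = w.length by rw [hps]]
    exact h

theorem pigLatin_eq (w : List Char) (hne : w ≠ [])
    (ha : ∀ c ∈ w, PySem.Chars.isalpha c = true) : pigLatinA w = pigLatinB w := by
  obtain ⟨c0, rest, rfl⟩ := List.exists_cons_of_ne_nil hne
  by_cases hv : c0 ∈ pvVowels
  · by_cases hYA : (pyIsupper (c0 :: rest) = true ∧ 0 < rest.length) <;>
      simp [pigLatinA, pigLatinB, hv, hYA]
  · have hmove := moveLoopA_spec (c0 :: rest) (pyIsupper (c0 :: rest))
    have hsplit := countConsB_take_drop (c0 :: rest)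
    cases hcaps : pyIsupper (c0 :: rest) with
    | true =>
      rw [hcaps] at hmove
      rw [show pvMove true = id by funext a; simp [pvMove], List.map_id] at hmove
      simp only [List.length_cons, List.contains_eq_mem] at hmove
      simp only [pigLatinA, pigLatinB, hv, hcaps]
      simp only [List.length_cons, hsplit.1, hsplit.2]
      simp [hv, hmove]
    | false =>
      rw [hcaps] at hmove
      rw [show pvMove false = PySem.Chars.lowerChar by funext a; simp [pvMove]] at hmove
      simp only [List.length_cons, List.contains_eq_mem] at hmove
      cases htc : pyIstitle (c0 :: rest) with
      | false =>
        simp only [pigLatinA, pigLatinB, hv, hcaps, htc]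
        simp only [List.length_cons, hsplit.1, hsplit.2]
        simp [hv, hmove]
      | true =>
        simp only [pigLatinA, pigLatinB, hv, hcaps, htc]
        simp only [List.length_cons, hsplit.1, hsplit.2]
        rw [if_neg (show ¬ pvVowels.contains c0 = true by simpa using hv)]
        rw [if_neg (show ¬ false = true by simp)]
        rw [if_neg (show ¬ (pvVowels.contains c0 = true) by simpa using hv)]
        rw [hmove]
        simp only [Bool.not_false, Bool.true_and, htc, if_pos rfl]
        rw [List.append_assoc]
        rw [pyTitle_eq_capitalize]
        · simp [List.append_assoc]
        intro x hx
        simp only [List.mem_append, List.mem_map] at hx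
        rcases hx with hx | ⟨y, hy, rfl⟩ | hx
        · exact ha x ((List.dropWhile_sublist _).subset hx)
        · exact isalpha_lowerChar (ha y ((List.takeWhile_sublist _).subset hy))
        · fin_cases hx <;> decide

-- A's foldl split loop computes tokA
theorem foldl_splitStepA :
    ∀ (cs : List Char) (ms : List (List Char)) (w : List Char),
      (let st := cs.foldl splitStepA (ms, w)
       if st.2.length > 0 then st.1 ++ [st.2] else st.1) = ms ++ tokA w cs := by
  intro cs
  induction cs with
  | nil =>
    intro ms w
    simp only [List.foldl_nil, tokA]
    split <;> simp_all [tokA]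
  | cons c cs ih =>
    intro ms w
    by_cases h : PySem.Chars.isalnum c = true
    · simp [List.foldl_cons, splitStepA, h, ih, tokA]
    · simp only [Bool.not_eq_true] at h
      by_cases hw : w.length > 0
      · simp [List.foldl_cons, splitStepA, h, hw, ih, tokA]
      · simp [List.foldl_cons, splitStepA, h, hw, ih, tokA]

theorem foldl_emitStepA :
    ∀ (ts : List (List Char)) (acc : List Char),
      ts.foldl emitStepA acc
        = acc ++ (ts.map (fun t => if PySem.Chars.strIsalpha t then pigLatinA t else t)).flatten := by
  intro ts
  induction ts with
  | nil => simp
  | cons t ts ih => intro acc; simp [emitStepA, ih]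

theorem emitA_eq_emitB (t : List Char) :
    (if PySem.Chars.strIsalpha t then pigLatinA t else t) = emitB t := by
  unfold emitB
  by_cases h : PySem.Chars.strIsalpha t = true
  · have h' := h
    unfold PySem.Chars.strIsalpha at h'
    simp only [Bool.and_eq_true, Bool.not_eq_eq_eq_not, Bool.not_true, List.all_eq_true] at h'
    rw [if_pos h, if_pos h, pigLatin_eq t (by simpa [List.isEmpty_iff] using h'.1) h'.2]
  · simp [h]

theorem tokA_acc :
    ∀ (p : List Char) (w z : List Char), (∀ c ∈ p, PySem.Chars.isalnum c = true) →
      tokA w (p ++ z) = tokA (w ++ p) z := by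
  intro p
  induction p with
  | nil => simp
  | cons c p ih =>
    intro w z h
    simp only [List.cons_append, tokA, h c (by simp), if_pos rfl]
    rw [ih (w ++ [c]) z (fun x hx => h x (by simp [hx]))]
    simp

theorem tokA_break (w z : List Char) (hw : w ≠ [])
    (hz : z = [] ∨ ∃ d z', z = d :: z' ∧ PySem.Chars.isalnum d = false) :
    tokA w z = w :: tokA [] z := by
  rcases hz with rfl | ⟨d, z', rfl, hd⟩
  · simp [tokA, List.length_pos_iff.2 hw]
  · simp [tokA, hd, List.length_pos_iff.2 hw]

theorem tokA_nonalnum :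
    ∀ (q z : List Char), (∀ c ∈ q, PySem.Chars.isalnum c = false) →
      tokA [] (q ++ z) = (q.map (fun d => [d])) ++ tokA [] z := by
  intro q
  induction q with
  | nil => simp
  | cons c q ih =>
    intro z h
    simp only [List.cons_append, tokA, h c (by simp)]
    simp [ih z (fun x hx => h x (by simp [hx]))]

theorem renderB_cons (t : List Char) (ts : List (List Char)) :
    renderB (t :: ts) = emitB t ++ renderB ts := by simp [renderB]

theorem renderB_append (xs ys : List (List Char)) :
    renderB (xs ++ ys) = renderB xs ++ renderB ys := by simp [renderB]

theorem emitB_nonalpha_head (c : Char) (q : List Char) (h : PySem.Chars.isalnum c = false) :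
    emitB (c :: q) = c :: q := by
  unfold emitB PySem.Chars.strIsalpha
  simp [isalnum_not_isalpha h]

theorem renderB_singletons (q : List Char) (h : ∀ c ∈ q, PySem.Chars.isalnum c = false) :
    renderB (q.map (fun d => [d])) = q := by
  induction q with
  | nil => rfl
  | cons c q ih =>
    simp only [List.map_cons, renderB_cons]
    rw [emitB_nonalpha_head c [] (h c (by simp)), ih (fun x hx => h x (by simp [hx]))]
    rfl

-- rendering A's tokens and B's runs gives the same string
theorem render_tokA_eq_runsB : ∀ cs : List Char, renderB (tokA [] cs) = renderB (runsB cs) := by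
  intro cs
  induction cs using runsB.induct with
  | case1 => rw [runsB]; rfl
  | case2 c rest ih =>
    cases hc : PySem.Chars.isalnum c with
    | true =>
      have hkey : (fun d => PySem.Chars.isalnum d == PySem.Chars.isalnum c)
          = fun d => PySem.Chars.isalnum d := by
        funext d; rw [hc]; cases PySem.Chars.isalnum d <;> rfl
      rw [runsB]
      rw [hkey] at ih ⊢
      set p := rest.takeWhile (fun d => PySem.Chars.isalnum d) with hp
      set z := rest.dropWhile (fun d => PySem.Chars.isalnum d) with hz
      have hrest : p ++ z = rest := List.takeWhile_append_dropWhile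
      have h1 : tokA [] (c :: rest) = tokA [c] rest := by
        simp [tokA, hc]
      have h2 : tokA [c] rest = tokA (c :: p) z := by
        conv_lhs => rw [← hrest]
        rw [tokA_acc p [c] z (fun x hx => by simpa using List.mem_takeWhile_imp hx)]
        rfl
      have h3 : tokA (c :: p) z = (c :: p) :: tokA [] z := by
        apply tokA_break _ _ (by simp)
        cases hzc : z with
        | nil => exact Or.inl rfl
        | cons d z' =>
          exact Or.inr ⟨d, z', rfl, by
            simpa using dropWhile_head_false (fun d => PySem.Chars.isalnum d) rest d z'
              (by rw [← hz, hzc])⟩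
      rw [h1, h2, h3, renderB_cons, renderB_cons, ih]
    | false =>
      have hkey : (fun d => PySem.Chars.isalnum d == PySem.Chars.isalnum c)
          = fun d => !(PySem.Chars.isalnum d) := by
        funext d; rw [hc]; cases PySem.Chars.isalnum d <;> rfl
      rw [runsB]
      rw [hkey] at ih ⊢
      set q := rest.takeWhile (fun d => !(PySem.Chars.isalnum d)) with hq
      set z := rest.dropWhile (fun d => !(PySem.Chars.isalnum d)) with hz
      have hrest : q ++ z = rest := List.takeWhile_append_dropWhile
      have hqmem : ∀ x ∈ c :: q, PySem.Chars.isalnum x = false := by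
        intro x hx
        rcases List.mem_cons.1 hx with rfl | hx
        · exact hc
        · simpa using List.mem_takeWhile_imp hx
      have h1 : tokA [] (c :: rest) = ((c :: q).map (fun d => [d])) ++ tokA [] z := by
        conv_lhs => rw [show c :: rest = (c :: q) ++ z by simp [← hrest]]
        exact tokA_nonalnum (c :: q) z hqmem
      rw [h1, renderB_append, renderB_singletons _ hqmem, renderB_cons,
        emitB_nonalpha_head c q hc, ih]

-- ===== VERDICT (by name: the statement is the Claim_ definition above) =====
theorem convertMessage_spec : Claim_equal_convertMessage := by
  intro message _
  unfold Spec_convertMessage convertMessage convertMessage_alt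
  have h1 := foldl_splitStepA message.toList [] []
  simp only [List.nil_append] at h1
  simp only [h1, foldl_emitStepA, List.nil_append]
  have h2 : ∀ ts : List (List Char),
      (ts.map (fun t => if PySem.Chars.strIsalpha t then pigLatinA t else t)).flatten
        = renderB ts := by
    intro ts; unfold renderB; congr 1; exact List.map_congr_left (fun t _ => emitA_eq_emitB t)
  rw [h2, render_tokA_eq_runsB]
  rfl
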